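-- pv_equiv track=rewrite | github.com/KyoungSoo1996/python-coding-practice | python project/programers/smartphone.py | handLength
-- ===== SOURCE A (Python) =====
-- def handLength(current, pos):
--     length = 0
--     while pos != current:
--         if pos > current:
--             if pos >= current + 3:
--                 current = current + 3
--                 length += 1
--             elif pos >= current + 1:
--                 current = current + 1
--                 length += 1
--
--         else:
--             if pos <= current - 3:
--                 current = current - 3
--                 length += 1
--             elif pos <= current - 1:
--                 current = current - 1
--                 length += 1
--     return (length)
-- ===== SOURCE B (Python) =====
-- def handLength(current, pos):
--     # Closed form: the loop takes |pos-current|//3 jumps of 3, then |pos-current|%3 steps of 1.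
--     q, r = divmod(abs(pos - current), 3)
--     return q + r
-- ===== Notes on version B (the rewrite author's own statement) =====
-- stated objective: faster
-- what changed: Replaced the step-by-step while loop with the closed form divmod(abs(pos-current),3): quotient + remainder.
import Mathlib
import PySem

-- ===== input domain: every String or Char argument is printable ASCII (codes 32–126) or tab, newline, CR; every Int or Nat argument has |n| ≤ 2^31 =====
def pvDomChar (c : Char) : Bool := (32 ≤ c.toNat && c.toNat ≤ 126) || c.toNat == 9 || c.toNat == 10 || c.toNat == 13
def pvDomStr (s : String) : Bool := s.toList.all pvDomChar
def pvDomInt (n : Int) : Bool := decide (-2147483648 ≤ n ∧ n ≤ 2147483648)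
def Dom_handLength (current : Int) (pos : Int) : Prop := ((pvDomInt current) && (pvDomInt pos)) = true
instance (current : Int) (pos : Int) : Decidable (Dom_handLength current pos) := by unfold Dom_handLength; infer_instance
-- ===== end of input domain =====

-- B replaces A's step-by-step while loop with the closed form divmod(|pos-current|,3): quotient + remainder (asymptotically faster).


-- ===== PORT A =====
-- the while loop, state (current, length); branch order as in A.
-- The inner `elif pos >= current + 1` of A is always true when `pos > current`;
-- in its (unreachable) else the Python loop would spin forever with unchanged state,
-- transliterated here as returning length (never taken; needed for totality).
def handLengthGo (current : Int) (pos : Int) (length : Int) : Int :=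
  if pos = current then length
  else if pos > current then
    if pos ≥ current + 3 then handLengthGo (current + 3) pos (length + 1)
    else if pos ≥ current + 1 then handLengthGo (current + 1) pos (length + 1)
    else length
  else
    if pos ≤ current - 3 then handLengthGo (current - 3) pos (length + 1)
    else if pos ≤ current - 1 then handLengthGo (current - 1) pos (length + 1)
    else length
termination_by (pos - current).natAbs
decreasing_by all_goals omega

def handLength (current : Int) (pos : Int) : Int :=
  handLengthGo current pos 0

-- ===== PORT B =====
-- q, r = divmod(abs(pos - current), 3); return q + r
def handLength_alt (current : Int) (pos : Int) : Int :=
  match PySem.Int.divmod? (|pos - current|) 3 with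
  | some (q, r) => q + r
  | none => 0  -- unreachable: divisor is the literal 3

-- ===== PRECONDITION & SPEC =====
def Spec_handLength (current : Int) (pos : Int) (out : Int) : Prop := out = handLength_alt current pos
instance (current : Int) (pos : Int) (out : Int) : Decidable (Spec_handLength current pos out) := by unfold Spec_handLength; infer_instance

-- ===== CLAIM (what is proved, stated in full; the proofs are below) =====
def Claim_equal_handLength : Prop := ∀ (current : Int) (pos : Int), Dom_handLength current pos → Spec_handLength current pos (handLength current pos)

-- ===== LEMMAS AND PROOFS =====

theorem handLengthGo_closed (current pos length : Int) :
    handLengthGo current pos length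
      = length + (pos - current).natAbs / 3 + (pos - current).natAbs % 3 := by
  fun_induction handLengthGo current pos length <;> omega

theorem handLength_alt_closed (current pos : Int) :
    handLength_alt current pos
      = (pos - current).natAbs / 3 + (pos - current).natAbs % 3 := by
  unfold handLength_alt PySem.Int.divmod?
  norm_num
  rw [Int.fdiv_eq_ediv, Int.fmod_eq_emod]
  norm_num

-- ===== VERDICT (by name: the statement is the Claim_ definition above) =====
theorem handLength_spec : Claim_equal_handLength := by
  intro current pos _
  unfold Spec_handLength handLength
  rw [handLengthGo_closed, handLength_alt_closed]
  omega
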